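-- pv_equiv track=rewrite | github.com/JJang-404/2team-GenPrj-frontend | sample_ver3/ai/validation.py | sanitize_copy_updates
-- ===== SOURCE A (Python) =====
-- ALLOWED_COPY_KEYS = {
--     "logo",
--     "slogan",
--     "headline",
--     "subheadline",
--     "body",
--     "price",
--     "discount_badge",
--     "footer",
--     "hashtags",
--     "open_close",
-- }
--
-- def sanitize_copy_updates(value: object) -> dict[str, str]:
--     if not isinstance(value, dict):
--         return {}
--     cleaned: dict[str, str] = {}
--     for key, raw in value.items():
--         if key not in ALLOWED_COPY_KEYS or not isinstance(raw, str):
--             continue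
--         text = " ".join(raw.split()).strip()
--         if not text:
--             continue
--         cleaned[key] = text[:160]
--     return cleaned
-- ===== SOURCE B (Python) =====
-- ALLOWED_COPY_KEYS = {
--     "logo",
--     "slogan",
--     "headline",
--     "subheadline",
--     "body",
--     "price",
--     "discount_badge",
--     "footer",
--     "hashtags",
--     "open_close",
-- }
--
--
-- def _collapse(raw: str) -> str:
--     # Single-pass whitespace normalization: collapse runs, drop leading/trailing.
--     out = []
--     pending = False
--     for ch in raw:
--         if ch.isspace():
--             pending = bool(out)
--         else:
--             if pending:
--                 out.append(" ")
--                 pending = False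
--             out.append(ch)
--     return "".join(out)
--
--
-- def sanitize_copy_updates(value: object) -> dict[str, str]:
--     if not isinstance(value, dict):
--         return {}
--     return {
--         key: text[:160]
--         for key, raw in value.items()
--         if key in ALLOWED_COPY_KEYS
--         and isinstance(raw, str)
--         and (text := _collapse(raw))
--     }
-- ===== Notes on version B (the rewrite author's own statement) =====
-- stated objective: alternative
-- what changed: B replaces A's split/join/strip whitespace pipeline (three passes building an intermediate word list) by a single-pass pending-space state machine over the characters, and builds the result with a dict comprehension filter instead of A's accumulate-and-overwrite loop.
import Mathlib
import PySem

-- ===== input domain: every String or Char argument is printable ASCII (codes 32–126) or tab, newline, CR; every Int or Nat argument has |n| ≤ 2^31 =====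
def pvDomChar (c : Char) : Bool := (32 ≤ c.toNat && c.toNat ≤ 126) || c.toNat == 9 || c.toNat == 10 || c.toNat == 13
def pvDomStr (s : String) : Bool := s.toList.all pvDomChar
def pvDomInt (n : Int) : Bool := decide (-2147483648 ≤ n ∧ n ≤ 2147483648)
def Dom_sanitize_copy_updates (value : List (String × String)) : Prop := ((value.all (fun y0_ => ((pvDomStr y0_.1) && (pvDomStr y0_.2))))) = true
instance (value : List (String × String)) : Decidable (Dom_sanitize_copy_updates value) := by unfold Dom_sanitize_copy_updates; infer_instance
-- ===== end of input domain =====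

-- B normalizes whitespace with a one-pass pending-space state machine and builds the result
-- by a filtering comprehension, instead of A's split/join/strip pipeline and dict-accumulator loop.


-- ===== PORT A =====
-- module-level constant ALLOWED_COPY_KEYS (a Python set literal; used only for membership tests)
def pvAllowedCopyKeys : PySem.Set String :=
  PySem.Set.ofList ["logo", "slogan", "headline", "subheadline", "body", "price",
    "discount_badge", "footer", "hashtags", "open_close"]

-- 'value' is a dict of str→str under the type convention, so 'isinstance(value, dict)'
-- and 'isinstance(raw, str)' are always true and the 'return {}' branch is dead.
def sanitize_copy_updates (value : List (String × String)) : List (String × String) :=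
  (value.foldl
    (fun (cleaned : PySem.Dict String String) kv =>
      if !(PySem.Set.contains pvAllowedCopyKeys kv.1) then cleaned
      else
        let text := PySem.Str.strip (PySem.Str.join " " (PySem.Str.split₀ kv.2))
        if text = "" then cleaned
        else cleaned.insert kv.1 (PySem.Str.slice text none (some 160)))
    PySem.Dict.empty).items

-- ===== PORT B =====
-- _collapse's loop: out is built in reverse; pending = "a space must be emitted before the next char"
def pvCollapseGo : List Char → List Char → Bool → List Char
  | [], out, _ => out.reverse
  | c :: rest, out, pending =>
    if PySem.Chars.isspace c then pvCollapseGo rest out (!out.isEmpty)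
    else pvCollapseGo rest (c :: (if pending then ' ' :: out else out)) false

def pvCollapse (raw : String) : String := String.ofList (pvCollapseGo raw.toList [] false)

def sanitize_copy_updates_alt (value : List (String × String)) : List (String × String) :=
  value.filterMap (fun kv =>
    if PySem.Set.contains pvAllowedCopyKeys kv.1 then
      let text := pvCollapse kv.2
      if text = "" then none
      else some (kv.1, PySem.Str.slice text none (some 160))
    else none)

-- ===== PRECONDITION & SPEC =====
-- Pre_ excludes association lists with a repeated key: 'value' models a Python dict, which
-- cannot hold duplicate keys, so such lists correspond to no input the Python function accepts.
def Pre_sanitize_copy_updates (value : List (String × String)) : Prop :=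
  (value.map Prod.fst).Nodup
instance (value : List (String × String)) : Decidable (Pre_sanitize_copy_updates value) := by
  unfold Pre_sanitize_copy_updates; infer_instance

def pvWitness_sanitize_copy_updates : (List (String × String)) :=
  [("logo", "  My   Shop \t"), ("price", "   "), ("nope", "x")]

def Spec_sanitize_copy_updates (value : List (String × String)) (out : List (String × String)) : Prop := out = sanitize_copy_updates_alt value
instance (value : List (String × String)) (out : List (String × String)) : Decidable (Spec_sanitize_copy_updates value out) := by unfold Spec_sanitize_copy_updates; infer_instance

-- ===== CLAIM (what is proved, stated in full; the proofs are below) =====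
def Claim_equal_sanitize_copy_updates : Prop := ∀ (value : List (String × String)), Dom_sanitize_copy_updates value → Pre_sanitize_copy_updates value → Spec_sanitize_copy_updates value (sanitize_copy_updates value)

-- ===== LEMMAS AND PROOFS =====

-- the Python-side condition and stored value shared by both ports once the strings are identified
def pvCond (kv : String × String) : Bool :=
  PySem.Set.contains pvAllowedCopyKeys kv.1 && !(pvCollapse kv.2 == "")
def pvVal (kv : String × String) : String :=
  PySem.Str.slice (pvCollapse kv.2) none (some 160)

-- reversed join of the reversed accumulated words (collapse's 'out' between words)
def pvJ (accs : List (List Char)) : List Char :=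
  (PySem.Chars.join [' '] accs.reverse).reverse
-- collapse's 'out' as a function of split₀.go's state
def pvAcc (cur : List Char) (accs : List (List Char)) : List Char :=
  if cur.isEmpty then pvJ accs else cur ++ (if accs.isEmpty then [] else ' ' :: pvJ accs)
def pvPend (cur : List Char) (accs : List (List Char)) : Bool :=
  cur.isEmpty && !accs.isEmpty

theorem pv_join_append_singleton (l : List (List Char)) (y : List Char) :
    PySem.Chars.join [' '] (l ++ [y]) =
      (if l.isEmpty then [] else PySem.Chars.join [' '] l ++ [' ']) ++ y := by
  induction l with
  | nil => simp [PySem.Chars.join_singleton]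
  | cons a t ih =>
    cases t with
    | nil => simp [PySem.Chars.join_cons_cons, PySem.Chars.join_singleton]
    | cons b t' =>
      rw [List.cons_append, List.cons_append, PySem.Chars.join_cons_cons,
        ← List.cons_append, ih, PySem.Chars.join_cons_cons]
      simp

theorem pv_join_ne_nil (l : List (List Char)) (h : ∀ w ∈ l, w ≠ []) (hl : l ≠ []) :
    PySem.Chars.join [' '] l ≠ [] := by
  cases l with
  | nil => exact absurd rfl hl
  | cons a t =>
    cases t with
    | nil =>
      rw [PySem.Chars.join_singleton]
      exact h a (by simp)
    | cons b t' =>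
      rw [PySem.Chars.join_cons_cons]
      have := h a (by simp)
      cases a with
      | nil => exact absurd rfl this
      | cons c cs => simp

theorem pvJ_isEmpty (accs : List (List Char)) (h : ∀ w ∈ accs, w ≠ []) :
    (pvJ accs).isEmpty = accs.isEmpty := by
  cases accs with
  | nil => simp [pvJ]
  | cons a t =>
    have hne : PySem.Chars.join [' '] (t.reverse ++ [a]) ≠ [] := by
      apply pv_join_ne_nil
      · intro w hw
        rcases List.mem_append.mp hw with hw | hw
        · exact h w (List.mem_cons_of_mem a (List.mem_reverse.mp hw))
        · rw [List.mem_singleton.mp hw]; exact h a (by simp)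
      · simp
    simp [pvJ, List.isEmpty_iff, hne]

theorem pvAcc_push (c : Char) (cur' : List Char) (accs : List (List Char)) :
    pvAcc [] ((c :: cur').reverse :: accs) = pvAcc (c :: cur') accs := by
  cases accs with
  | nil => simp [pvAcc, pvJ, pv_join_append_singleton]
  | cons a t =>
    cases t with
    | nil =>
      simp [pvAcc, pvJ, pv_join_append_singleton, PySem.Chars.join_cons_cons,
        PySem.Chars.join_singleton]
    | cons b t' =>
      simp only [pvAcc, pvJ]
      rw [show ((c :: cur').reverse :: a :: b :: t').reverse
          = ((t'.reverse ++ [b]) ++ [a]) ++ [(c :: cur').reverse] by simp,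
        pv_join_append_singleton, pv_join_append_singleton, pv_join_append_singleton,
        show (a :: b :: t').reverse = (t'.reverse ++ [b]) ++ [a] by simp,
        pv_join_append_singleton, pv_join_append_singleton]
      simp

theorem pvAcc_nonspace (c : Char) (cur : List Char) (accs : List (List Char)) :
    pvAcc (c :: cur) accs =
      c :: (if pvPend cur accs then ' ' :: pvAcc cur accs else pvAcc cur accs) := by
  cases cur with
  | nil =>
    cases accs with
    | nil => simp [pvAcc, pvPend, pvJ]
    | cons a t => simp [pvAcc, pvPend]
  | cons c' cur' =>
    cases accs with
    | nil => simp [pvAcc, pvPend]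
    | cons a t => simp [pvAcc, pvPend]

theorem pv_go_main (cs : List Char) :
    ∀ (cur : List Char) (accs : List (List Char)), (∀ w ∈ accs, w ≠ []) →
      pvCollapseGo cs (pvAcc cur accs) (pvPend cur accs) =
        PySem.Chars.join [' '] (PySem.Chars.split₀.go cs cur accs) := by
  induction cs with
  | nil =>
    intro cur accs h
    cases cur with
    | nil => simp [pvCollapseGo, PySem.Chars.split₀.go, pvAcc, pvJ]
    | cons c cur' =>
      rw [show PySem.Chars.split₀.go [] (c :: cur') accs
          = ((c :: cur').reverse :: accs).reverse from by simp [PySem.Chars.split₀.go]]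
      rw [List.reverse_cons, pv_join_append_singleton]
      cases accs with
      | nil => simp [pvCollapseGo, pvAcc, pvJ]
      | cons a t => simp [pvCollapseGo, pvAcc, pvJ]
  | cons c rest ih =>
    intro cur accs h
    by_cases hsp : PySem.Chars.isspace c = true
    · cases cur with
      | nil =>
        rw [show PySem.Chars.split₀.go (c :: rest) [] accs
            = PySem.Chars.split₀.go rest [] accs from by simp [PySem.Chars.split₀.go, hsp]]
        rw [show pvCollapseGo (c :: rest) (pvAcc [] accs) (pvPend [] accs)
            = pvCollapseGo rest (pvAcc [] accs) (!(pvAcc [] accs).isEmpty) from by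
              simp [pvCollapseGo, hsp]]
        rw [show (!(pvAcc [] accs).isEmpty) = pvPend [] accs from by
              simp [pvAcc, pvPend, pvJ_isEmpty accs h]]
        exact ih [] accs h
      | cons c' cur' =>
        rw [show PySem.Chars.split₀.go (c :: rest) (c' :: cur') accs
            = PySem.Chars.split₀.go rest [] ((c' :: cur').reverse :: accs) from by
              simp [PySem.Chars.split₀.go, hsp]]
        rw [show pvCollapseGo (c :: rest) (pvAcc (c' :: cur') accs) (pvPend (c' :: cur') accs)
            = pvCollapseGo rest (pvAcc (c' :: cur') accs) (!(pvAcc (c' :: cur') accs).isEmpty)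
              from by simp [pvCollapseGo, hsp]]
        have h' : ∀ w ∈ (c' :: cur').reverse :: accs, w ≠ [] := by
          intro w hw
          rcases List.mem_cons.mp hw with hw | hw
          · subst hw; simp
          · exact h w hw
        rw [show (!(pvAcc (c' :: cur') accs).isEmpty)
            = pvPend [] ((c' :: cur').reverse :: accs) from by simp [pvAcc, pvPend],
          ← pvAcc_push]
        exact ih [] ((c' :: cur').reverse :: accs) h'
    · rw [show PySem.Chars.split₀.go (c :: rest) cur accs
          = PySem.Chars.split₀.go rest (c :: cur) accs from by
            simp [PySem.Chars.split₀.go, hsp]]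
      rw [show pvCollapseGo (c :: rest) (pvAcc cur accs) (pvPend cur accs)
          = pvCollapseGo rest
              (c :: (if pvPend cur accs then ' ' :: pvAcc cur accs else pvAcc cur accs)) false
            from by simp [pvCollapseGo, hsp]]
      rw [← pvAcc_nonspace,
        show (false : Bool) = pvPend (c :: cur) accs from by simp [pvPend]]
      exact ih (c :: cur) accs h

theorem pv_split₀_go_spec (cs : List Char) :
    ∀ (cur : List Char) (accs : List (List Char)),
      (∀ w ∈ accs, w ≠ [] ∧ ∀ c ∈ w, PySem.Chars.isspace c = false) →
      (∀ c ∈ cur, PySem.Chars.isspace c = false) →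
      ∀ w ∈ PySem.Chars.split₀.go cs cur accs, w ≠ [] ∧ ∀ c ∈ w, PySem.Chars.isspace c = false := by
  induction cs with
  | nil =>
    intro cur accs haccs hcur w hw
    cases cur with
    | nil =>
      rw [show PySem.Chars.split₀.go [] [] accs = accs.reverse from by
        simp [PySem.Chars.split₀.go]] at hw
      exact haccs w (List.mem_reverse.mp hw)
    | cons c cur' =>
      rw [show PySem.Chars.split₀.go [] (c :: cur') accs = ((c :: cur').reverse :: accs).reverse
          from by simp [PySem.Chars.split₀.go]] at hw
      rcases List.mem_cons.mp (List.mem_reverse.mp hw) with hw | hw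
      · subst hw
        refine ⟨by simp, fun x hx => hcur x (List.mem_reverse.mp hx)⟩
      · exact haccs w hw
  | cons c rest ih =>
    intro cur accs haccs hcur w hw
    by_cases hsp : PySem.Chars.isspace c = true
    · cases cur with
      | nil =>
        rw [show PySem.Chars.split₀.go (c :: rest) [] accs = PySem.Chars.split₀.go rest [] accs
            from by simp [PySem.Chars.split₀.go, hsp]] at hw
        exact ih [] accs haccs (by simp) w hw
      | cons c' cur' =>
        rw [show PySem.Chars.split₀.go (c :: rest) (c' :: cur') accs
            = PySem.Chars.split₀.go rest [] ((c' :: cur').reverse :: accs)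
            from by simp [PySem.Chars.split₀.go, hsp]] at hw
        refine ih [] ((c' :: cur').reverse :: accs) ?_ (by simp) w hw
        intro v hv
        rcases List.mem_cons.mp hv with hv | hv
        · subst hv
          exact ⟨by simp, fun x hx => hcur x (List.mem_reverse.mp hx)⟩
        · exact haccs v hv
    · rw [show PySem.Chars.split₀.go (c :: rest) cur accs
          = PySem.Chars.split₀.go rest (c :: cur) accs
          from by simp [PySem.Chars.split₀.go, hsp]] at hw
      refine ih (c :: cur) accs haccs ?_ w hw
      intro x hx
      rcases List.mem_cons.mp hx with hx | hx
      · subst hx; simpa using hsp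
      · exact hcur x hx

theorem pv_join_reverse (l : List (List Char)) :
    (PySem.Chars.join [' '] l).reverse = PySem.Chars.join [' '] ((l.map List.reverse).reverse) := by
  induction l with
  | nil => simp [PySem.Chars.join_nil]
  | cons w ws ih =>
    cases ws with
    | nil => simp [PySem.Chars.join_singleton]
    | cons b t =>
      rw [PySem.Chars.join_cons_cons]
      rw [show ((w :: b :: t).map List.reverse).reverse
          = ((b :: t).map List.reverse).reverse ++ [w.reverse] from by simp,
        pv_join_append_singleton]
      rw [show (((b :: t).map List.reverse).reverse).isEmpty = false from by simp]
      rw [← ih]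
      simp

theorem pv_lstrip_join (l : List (List Char))
    (h : ∀ w ∈ l, w ≠ [] ∧ ∀ c ∈ w, PySem.Chars.isspace c = false) :
    PySem.Chars.lstrip (PySem.Chars.join [' '] l) = PySem.Chars.join [' '] l := by
  cases l with
  | nil => simp [PySem.Chars.join_nil, PySem.Chars.lstrip]
  | cons w ws =>
    obtain ⟨hne, hns⟩ := h w (by simp)
    cases w with
    | nil => exact absurd rfl hne
    | cons c w' =>
      have hc : PySem.Chars.isspace c = false := hns c (by simp)
      cases ws with
      | nil =>
        rw [PySem.Chars.join_singleton]
        simp [PySem.Chars.lstrip, hc]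
      | cons b t =>
        rw [PySem.Chars.join_cons_cons]
        simp [PySem.Chars.lstrip, hc]

theorem pv_strip_join (l : List (List Char))
    (h : ∀ w ∈ l, w ≠ [] ∧ ∀ c ∈ w, PySem.Chars.isspace c = false) :
    PySem.Chars.strip (PySem.Chars.join [' '] l) = PySem.Chars.join [' '] l := by
  have hrev : ∀ w ∈ (l.map List.reverse).reverse, w ≠ [] ∧
      ∀ c ∈ w, PySem.Chars.isspace c = false := by
    intro w hw
    rcases List.mem_map.mp (List.mem_reverse.mp hw) with ⟨v, hv, rfl⟩
    obtain ⟨hne, hns⟩ := h v hv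
    exact ⟨by simpa using hne, fun x hx => hns x (List.mem_reverse.mp hx)⟩
  unfold PySem.Chars.strip PySem.Chars.rstrip
  rw [pv_lstrip_join l h]
  rw [pv_join_reverse l]
  have := pv_lstrip_join _ hrev
  unfold PySem.Chars.lstrip at this
  rw [this, ← pv_join_reverse l, List.reverse_reverse]

-- A's normalized text equals B's one-pass collapse
theorem pv_text_eq (s : String) :
    PySem.Str.strip (PySem.Str.join " " (PySem.Str.split₀ s)) = pvCollapse s := by
  have hT : (PySem.Str.join " " (PySem.Str.split₀ s)).toList
      = PySem.Chars.join [' '] (PySem.Chars.split₀ s.toList) := by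
    rw [PySem.Str.toList_join]
    simp [PySem.Str.split₀, List.map_map, Function.comp_def]
  have h2 : PySem.Str.strip (PySem.Str.join " " (PySem.Str.split₀ s))
      = String.ofList (PySem.Chars.strip
          (PySem.Chars.join [' '] (PySem.Chars.split₀ s.toList))) := by
    unfold PySem.Str.strip
    rw [hT]
  rw [h2]
  unfold pvCollapse
  congr 1
  rw [show PySem.Chars.split₀ s.toList = PySem.Chars.split₀.go s.toList [] [] from rfl]
  rw [pv_strip_join _ (pv_split₀_go_spec s.toList [] [] (by simp) (by simp))]
  have hm := pv_go_main s.toList [] [] (by simp)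
  simp only [pvAcc, pvPend, pvJ, List.isEmpty_nil, if_true, List.reverse_nil,
    PySem.Chars.join_nil, Bool.and_self] at hm
  rw [← hm]
  norm_num

-- A's fold is the plain insert-fold over the rows passing pvCond
theorem pv_foldA (value : List (String × String)) (d : PySem.Dict String String) :
    value.foldl
      (fun (cleaned : PySem.Dict String String) kv =>
        if !(PySem.Set.contains pvAllowedCopyKeys kv.1) then cleaned
        else
          let text := PySem.Str.strip (PySem.Str.join " " (PySem.Str.split₀ kv.2))
          if text = "" then cleaned
          else cleaned.insert kv.1 (PySem.Str.slice text none (some 160))) d =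
    (value.filter pvCond).foldl (fun d kv => d.insert kv.1 (pvVal kv)) d := by
  induction value generalizing d with
  | nil => rfl
  | cons kv t ih =>
    rw [List.foldl_cons, List.filter_cons]
    have hbody : (if !(PySem.Set.contains pvAllowedCopyKeys kv.1) then d
        else
          let text := PySem.Str.strip (PySem.Str.join " " (PySem.Str.split₀ kv.2))
          if text = "" then d
          else d.insert kv.1 (PySem.Str.slice text none (some 160)))
        = if pvCond kv then d.insert kv.1 (pvVal kv) else d := by
      simp only [pv_text_eq, pvCond, pvVal]
      by_cases h1 : PySem.Set.contains pvAllowedCopyKeys kv.1 <;>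
        by_cases h2 : pvCollapse kv.2 = "" <;> simp [h1, h2]
    rw [hbody]
    by_cases hc : pvCond kv = true
    · simp only [hc, if_true, List.foldl_cons]
      exact ih _
    · simp only [Bool.not_eq_true] at hc
      simp only [hc, Bool.false_eq_true, if_false]
      exact ih _

theorem pv_altB (value : List (String × String)) :
    sanitize_copy_updates_alt value = (value.filter pvCond).map (fun kv => (kv.1, pvVal kv)) := by
  unfold sanitize_copy_updates_alt
  induction value with
  | nil => rfl
  | cons kv t ih =>
    rw [List.filterMap_cons, List.filter_cons]
    by_cases h1 : PySem.Set.contains pvAllowedCopyKeys kv.1 = true <;>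
      by_cases h2 : pvCollapse kv.2 = "" <;>
        simp only [pvCond, pvVal, h1, h2, if_true, if_false, Bool.not_true, Bool.not_false,
          Bool.and_true, Bool.and_false, Bool.false_eq_true, beq_iff_eq, beq_self_eq_true,
          Bool.true_and, Bool.false_and, ih, List.filter_cons] <;>
      simp [h2, ih]

-- ===== VERDICT (by name: the statement is the Claim_ definition above) =====
theorem sanitize_copy_updates_spec : Claim_equal_sanitize_copy_updates := by
  intro value _hdom hpre
  unfold Spec_sanitize_copy_updates
  unfold sanitize_copy_updates
  rw [pv_foldA, pv_altB]
  have hnodup : ((value.filter pvCond).map Prod.fst).Nodup :=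
    hpre.sublist (List.Sublist.map Prod.fst List.filter_sublist)
  rw [PySem.Dict.items_foldl_insert_fresh (value.filter pvCond) Prod.fst pvVal PySem.Dict.empty
      (fun a _ => PySem.Dict.contains_empty _) hnodup]
  rfl
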